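-- pv_equiv track=rewrite | github.com/andrewmoshu/transcription-service | app.py | parse_chapter_transcript
-- ===== SOURCE A (Python) =====
-- def parse_chapter_transcript(transcript: str) -> list:
--     """
--     Parses a chapter-based transcript into sections.
--
--     Args:
--         transcript: The full transcript text with CHAPTER: markers
--
--     Returns:
--         List of dictionaries with 'title', 'time_range', and 'content' keys
--     """
--     if not transcript or transcript.startswith("Error:"):
--         return []
--
--     chapters = []
--     current_chapter = None
--     current_content = []
--
--     lines = transcript.split('\n')
--
--     for line in lines:
--         line = line.strip()
--         if line.startswith('CHAPTER:'):
--             # Save previous chapter if exists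
--             if current_chapter:
--                 chapters.append({
--                     'title': current_chapter['title'],
--                     'time_range': current_chapter['time_range'],
--                     'content': '\n'.join(current_content).strip()
--                 })
--
--             # Parse new chapter
--             chapter_line = line[8:].strip()  # Remove 'CHAPTER:' prefix
--
--             # Try to extract title and time range
--             if '(' in chapter_line and ')' in chapter_line:
--                 title = chapter_line[:chapter_line.rfind('(')].strip()
--                 time_range = chapter_line[chapter_line.rfind('('):].strip('()')
--             else:
--                 title = chapter_line
--                 time_range = "Time not specified"
--
--             current_chapter = {
--                 'title': title,
--                 'time_range': time_range
--             }
--             current_content = []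
--         else:
--             if line:  # Add non-empty lines to current chapter content
--                 current_content.append(line)
--
--     # Add the last chapter
--     if current_chapter:
--         chapters.append({
--             'title': current_chapter['title'],
--             'time_range': current_chapter['time_range'],
--             'content': '\n'.join(current_content).strip()
--         })
--
--     # If no chapters were found, treat the entire transcript as one chapter
--     if not chapters and transcript:
--         chapters.append({
--             'title': "Full Meeting Transcript",
--             'time_range': "Complete Duration",
--             'content': transcript.strip()
--         })
--
--     return chapters
-- ===== SOURCE B (Python) =====
-- def parse_chapter_transcript(transcript: str) -> list:
--     if not transcript or transcript.startswith("Error:"):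
--         return []
--     lines = [l.strip() for l in transcript.split('\n')]
--     if not any(l.startswith('CHAPTER:') for l in lines):
--         return [{'title': "Full Meeting Transcript",
--                  'time_range': "Complete Duration",
--                  'content': transcript.strip()}]
--     # drop everything before the first marker, then peel off one segment per marker
--     while not lines[0].startswith('CHAPTER:'):
--         lines.pop(0)
--     chapters = []
--     while lines:
--         header = lines.pop(0)
--         body = []
--         while lines and not lines[0].startswith('CHAPTER:'):
--             body.append(lines.pop(0))
--         chapters.append(_make_chapter(header, body))
--     return chapters
--
-- def _make_chapter(header, body):
--     chapter_line = header[8:].strip()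
--     if '(' in chapter_line and ')' in chapter_line:
--         title = chapter_line[:chapter_line.rfind('(')].strip()
--         time_range = chapter_line[chapter_line.rfind('('):].strip('()')
--     else:
--         title = chapter_line
--         time_range = "Time not specified"
--     return {'title': title, 'time_range': time_range,
--             'content': '\n'.join(l for l in body if l).strip()}
-- ===== Notes on version B (the rewrite author's own statement) =====
-- stated objective: alternative
-- what changed: Replaces A's single-pass flush-on-boundary accumulator (pending chapter + content buffer, flushed at each marker and at EOF) with a two-phase decomposition: strip all lines up front, handle the no-marker fallback by one scan, then drop the preamble and peel off one marker-headed segment per chapter, building each dict from its header and body segment directly.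
import Mathlib
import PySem

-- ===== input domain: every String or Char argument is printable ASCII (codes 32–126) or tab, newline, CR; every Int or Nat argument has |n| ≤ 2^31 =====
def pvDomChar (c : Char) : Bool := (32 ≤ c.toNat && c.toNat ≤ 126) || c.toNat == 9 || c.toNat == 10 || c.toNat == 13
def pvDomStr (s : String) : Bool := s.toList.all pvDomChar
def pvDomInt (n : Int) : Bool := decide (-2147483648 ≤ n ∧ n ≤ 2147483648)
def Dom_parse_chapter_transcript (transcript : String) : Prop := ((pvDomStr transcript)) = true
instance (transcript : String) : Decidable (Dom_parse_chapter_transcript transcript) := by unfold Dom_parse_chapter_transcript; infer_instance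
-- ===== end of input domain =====

-- B replaces A's flush-on-boundary accumulator by a two-phase pass (drop the preamble, then
-- peel off one marker-headed segment per chapter); objective: a simpler decomposition, not speed.

-- ===== PORT A =====
-- A's loop state: (chapters, current_chapter, current_content).  current_chapter is the
-- two-key dict {'title': …, 'time_range': …}; since its keys are fixed it is ported as an
-- Option (title × time_range) pair, read back positionally where A reads the keys.
def pvStepA (st : List (List (String × String)) × Option (String × String) × List String)
    (line0 : String) : List (List (String × String)) × Option (String × String) × List String :=
  let line := PySem.Str.strip line0
  if PySem.Str.startswith line "CHAPTER:" then
    -- save previous chapter if exists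
    let cs :=
      match st.2.1 with
      | none => st.1
      | some c => st.1 ++ [[("title", c.1), ("time_range", c.2),
                            ("content", PySem.Str.strip (PySem.Str.join "\n" st.2.2))]]
    -- parse new chapter: remove the 'CHAPTER:' prefix, try to extract title and time range
    let chapter_line := PySem.Str.strip (PySem.Str.slice line (some 8) none)
    let tt :=
      if PySem.Str.isIn "(" chapter_line && PySem.Str.isIn ")" chapter_line then
        (PySem.Str.strip (PySem.Str.slice chapter_line none (some (PySem.Str.rfind chapter_line "("))),
         PySem.Str.stripChars (PySem.Str.slice chapter_line (some (PySem.Str.rfind chapter_line "(")) none) "()")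
      else (chapter_line, "Time not specified")
    (cs, some tt, [])
  else
    if line ≠ "" then (st.1, st.2.1, st.2.2 ++ [line]) else st

-- the final "add the last chapter" flush
def pvFinishA (st : List (List (String × String)) × Option (String × String) × List String) :
    List (List (String × String)) :=
  match st.2.1 with
  | none => st.1
  | some c => st.1 ++ [[("title", c.1), ("time_range", c.2),
                        ("content", PySem.Str.strip (PySem.Str.join "\n" st.2.2))]]

def parse_chapter_transcript (transcript : String) : List (List (String × String)) :=
  if transcript = "" ∨ PySem.Str.startswith transcript "Error:" = true then []
  else
    let lines := (PySem.Str.split? transcript "\n").getD []   -- sep ≠ "", so split? is always some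
    let chapters := pvFinishA (lines.foldl pvStepA ([], none, []))
    if chapters = [] ∧ transcript ≠ "" then
      [[("title", "Full Meeting Transcript"), ("time_range", "Complete Duration"),
        ("content", PySem.Str.strip transcript)]]
    else chapters

-- ===== PORT B =====
def pvIsMarker (l : String) : Bool := PySem.Str.startswith l "CHAPTER:"

def pvMkChapter (header : String) (body : List String) : List (String × String) :=
  let chapter_line := PySem.Str.strip (PySem.Str.slice header (some 8) none)
  let tt :=
    if PySem.Str.isIn "(" chapter_line && PySem.Str.isIn ")" chapter_line then
      (PySem.Str.strip (PySem.Str.slice chapter_line none (some (PySem.Str.rfind chapter_line "("))),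
       PySem.Str.stripChars (PySem.Str.slice chapter_line (some (PySem.Str.rfind chapter_line "(")) none) "()")
    else (chapter_line, "Time not specified")
  [("title", tt.1), ("time_range", tt.2),
   ("content", PySem.Str.strip (PySem.Str.join "\n" (body.filter (fun l => l ≠ ""))))]

-- one segment per marker line: the header and the lines up to the next marker
def pvSegs : List String → List (List (String × String))
  | [] => []
  | h :: t =>
      pvMkChapter h (t.takeWhile (fun l => !pvIsMarker l)) ::
        pvSegs (t.dropWhile (fun l => !pvIsMarker l))
termination_by l => l.length
decreasing_by
  simpa using Nat.lt_succ_of_le (List.length_dropWhile_le _ t)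

def parse_chapter_transcript_alt (transcript : String) : List (List (String × String)) :=
  if transcript = "" ∨ PySem.Str.startswith transcript "Error:" = true then []
  else
    let lines := ((PySem.Str.split? transcript "\n").getD []).map PySem.Str.strip
    if !(lines.any pvIsMarker) then
      [[("title", "Full Meeting Transcript"), ("time_range", "Complete Duration"),
        ("content", PySem.Str.strip transcript)]]
    else
      pvSegs (lines.dropWhile (fun l => !pvIsMarker l))

-- ===== PRECONDITION & SPEC =====
def Spec_parse_chapter_transcript (transcript : String) (out : List (List (String × String))) : Prop := out = parse_chapter_transcript_alt transcript
instance (transcript : String) (out : List (List (String × String))) : Decidable (Spec_parse_chapter_transcript transcript out) := by unfold Spec_parse_chapter_transcript; infer_instance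

-- ===== CLAIM (what is proved, stated in full; the proofs are below) =====
def Claim_equal_parse_chapter_transcript : Prop := ∀ (transcript : String), Dom_parse_chapter_transcript transcript → Spec_parse_chapter_transcript transcript (parse_chapter_transcript transcript)

-- ===== LEMMAS AND PROOFS =====

-- proof-side names for the two pieces A computes at a marker line
def pvParse (line : String) : String × String :=
  let chapter_line := PySem.Str.strip (PySem.Str.slice line (some 8) none)
  if PySem.Str.isIn "(" chapter_line && PySem.Str.isIn ")" chapter_line then
    (PySem.Str.strip (PySem.Str.slice chapter_line none (some (PySem.Str.rfind chapter_line "("))),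
     PySem.Str.stripChars (PySem.Str.slice chapter_line (some (PySem.Str.rfind chapter_line "(")) none) "()")
  else (chapter_line, "Time not specified")

def pvMkC (c : String × String) (acc : List String) : List (String × String) :=
  [("title", c.1), ("time_range", c.2), ("content", PySem.Str.strip (PySem.Str.join "\n" acc))]

theorem pvMkChapter_eq (h : String) (body : List String) :
    pvMkChapter h body = pvMkC (pvParse h) (body.filter (fun l => l ≠ "")) := by
  rfl

theorem pvStepA_marker (st : List (List (String × String)) × Option (String × String) × List String)
    (l0 : String) (hm : pvIsMarker (PySem.Str.strip l0) = true) :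
    pvStepA st l0 = (pvFinishA st, some (pvParse (PySem.Str.strip l0)), []) := by
  obtain ⟨cs, cur, acc⟩ := st
  simp only [pvIsMarker] at hm
  cases cur <;> simp only [pvStepA, pvFinishA, pvParse, hm, if_true]

theorem pvStepA_nonmarker (st : List (List (String × String)) × Option (String × String) × List String)
    (l0 : String) (hm : pvIsMarker (PySem.Str.strip l0) = false) :
    pvStepA st l0 =
      if PySem.Str.strip l0 ≠ "" then (st.1, st.2.1, st.2.2 ++ [PySem.Str.strip l0]) else st := by
  simp only [pvIsMarker] at hm
  simp only [pvStepA, hm, Bool.false_eq_true, if_false]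

theorem pvFoldA_some (t : List String) (cs : List (List (String × String)))
    (c : String × String) (acc : List String) :
    pvFinishA (t.foldl pvStepA (cs, some c, acc))
      = cs ++ pvMkC c (acc ++ ((t.map PySem.Str.strip).takeWhile (fun l => !pvIsMarker l)).filter (fun l => l ≠ ""))
          :: pvSegs ((t.map PySem.Str.strip).dropWhile (fun l => !pvIsMarker l)) := by
  induction t generalizing cs c acc with
  | nil => simp [pvFinishA, pvMkC, pvSegs]
  | cons h t ih =>
      by_cases hm : pvIsMarker (PySem.Str.strip h) = true
      · rw [List.foldl_cons, pvStepA_marker _ _ hm, ih]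
        simp [pvSegs, hm, pvFinishA, pvMkC, pvMkChapter_eq, List.append_assoc]
      · rw [Bool.not_eq_true] at hm
        rw [List.foldl_cons, pvStepA_nonmarker _ _ hm]
        by_cases he : PySem.Str.strip h = ""
        · rw [if_neg (by simp [he])]
          have h0 : pvIsMarker "" = false := by decide
          simp [ih, he, h0]
        · rw [if_pos he]
          simp [ih, hm, he]

theorem pvFoldA_none (t : List String) (cs : List (List (String × String))) (acc : List String) :
    pvFinishA (t.foldl pvStepA (cs, none, acc))
      = cs ++ pvSegs ((t.map PySem.Str.strip).dropWhile (fun l => !pvIsMarker l)) := by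
  induction t generalizing acc with
  | nil => simp [pvFinishA, pvSegs]
  | cons h t ih =>
      by_cases hm : pvIsMarker (PySem.Str.strip h) = true
      · rw [List.foldl_cons, pvStepA_marker _ _ hm, pvFoldA_some]
        simp [pvSegs, hm, pvFinishA, pvMkC, pvMkChapter_eq]
      · rw [Bool.not_eq_true] at hm
        rw [List.foldl_cons, pvStepA_nonmarker _ _ hm]
        by_cases he : PySem.Str.strip h = ""
        · rw [if_neg (by simp [he])]; simp [ih, hm]
        · rw [if_pos he]; simp [ih, hm]

-- ===== VERDICT (by name: the statement is the Claim_ definition above) =====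
theorem parse_chapter_transcript_spec : Claim_equal_parse_chapter_transcript := by
  intro transcript _
  unfold Spec_parse_chapter_transcript parse_chapter_transcript parse_chapter_transcript_alt
  by_cases hg : transcript = "" ∨ PySem.Str.startswith transcript "Error:" = true
  · rw [if_pos hg, if_pos hg]
  · rw [if_neg hg, if_neg hg]
    have hne : transcript ≠ "" := fun h => hg (Or.inl h)
    dsimp only
    rw [pvFoldA_none]
    simp only [List.nil_append]
    by_cases hany : ((((PySem.Str.split? transcript "\n").getD []).map PySem.Str.strip).any pvIsMarker) = true
    · have hdw_ne : (((PySem.Str.split? transcript "\n").getD []).map PySem.Str.strip).dropWhile (fun l => !pvIsMarker l) ≠ [] := by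
        intro hnil
        rw [List.dropWhile_eq_nil_iff] at hnil
        rcases List.any_eq_true.mp hany with ⟨x, hx, hpx⟩
        have := hnil x hx
        simp [hpx] at this
      have hseg : pvSegs ((((PySem.Str.split? transcript "\n").getD []).map PySem.Str.strip).dropWhile (fun l => !pvIsMarker l)) ≠ [] := by
        obtain ⟨a, b, hq⟩ := List.exists_cons_of_ne_nil hdw_ne
        rw [hq]
        simp [pvSegs]
      have hBne : ¬((!(((PySem.Str.split? transcript "\n").getD []).map PySem.Str.strip).any pvIsMarker) = true) := by simp [hany]
      have hAne : ¬(pvSegs ((((PySem.Str.split? transcript "\n").getD []).map PySem.Str.strip).dropWhile (fun l => !pvIsMarker l)) = [] ∧ ¬transcript = "") := fun hc => hseg hc.1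
      rw [if_neg hAne, if_neg hBne]
    · have hdw : (((PySem.Str.split? transcript "\n").getD []).map PySem.Str.strip).dropWhile (fun l => !pvIsMarker l) = [] := by
        rw [List.dropWhile_eq_nil_iff]
        intro x hx
        rw [Bool.not_eq_true, List.any_eq_false] at hany
        simp [hany x hx]
      have hBpos : (!(((PySem.Str.split? transcript "\n").getD []).map PySem.Str.strip).any pvIsMarker) = true := by simp [hany]
      have hApos : pvSegs ((((PySem.Str.split? transcript "\n").getD []).map PySem.Str.strip).dropWhile (fun l => !pvIsMarker l)) = [] ∧ ¬transcript = "" := ⟨by rw [hdw]; simp [pvSegs], hne⟩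
      rw [if_pos hApos, if_pos hBpos]
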